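-- pv_equiv track=rewrite | github.com/maantano/Coding-Test | 2023.11.30 유레카이론(10448) _브루트포스.py | solution
-- ===== SOURCE A (Python) =====
-- def solution(target,dp):
-- 	for j in range(1,1001):
-- 		if dp[j] > target:
-- 			break
-- 		for k in range(1,1001):
-- 			if dp[k] > target:
-- 				break
-- 			for m in range(1,1001):
-- 				if dp[m] > target:
-- 					break
-- 				# 	return
-- 				if dp[j]+dp[k]+dp[m] == target:
-- 					return 1
-- 	return 0
-- ===== SOURCE B (Python) =====
-- def solution(target, dp):
--     vals = []
--     for v in dp[1:1001]:
--         if v > target: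
--             break
--         vals.append(v)
--     s = set(vals)
--     for x in vals:
--         for y in vals:
--             if target - x - y in s:
--                 return 1
--     return 0
-- ===== Notes on version B (the rewrite author's own statement) =====
-- stated objective: faster
-- what changed: B collects in one pass the prefix of dp[1:1001] that A's loops ever scan (values until the first one exceeding target), builds a set of it, and replaces A's innermost scan by the membership test 'target-x-y in set', turning the triple loop into a double loop.
import Mathlib
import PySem

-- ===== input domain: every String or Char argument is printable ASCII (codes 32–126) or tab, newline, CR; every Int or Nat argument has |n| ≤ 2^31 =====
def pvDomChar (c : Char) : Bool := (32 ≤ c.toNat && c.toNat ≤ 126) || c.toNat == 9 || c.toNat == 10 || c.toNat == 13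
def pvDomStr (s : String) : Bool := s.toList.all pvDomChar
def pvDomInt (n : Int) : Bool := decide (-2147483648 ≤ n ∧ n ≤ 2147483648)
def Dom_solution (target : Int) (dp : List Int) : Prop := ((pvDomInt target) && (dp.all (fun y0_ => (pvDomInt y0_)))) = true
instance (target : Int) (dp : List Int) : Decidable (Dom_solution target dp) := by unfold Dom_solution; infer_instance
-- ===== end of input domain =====

set_option maxRecDepth 8192


-- B replaces A's triple nested index loop by one pass over the slice dp[1:1001] collecting the
-- scanned prefix, then a double loop with a set-membership test for the third summand.

-- ===== PORT A =====
-- innermost 'for m in range(1,1001)' loop; none = IndexError propagating out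
def solMLoop (t dj dk : Int) (dp : List Int) : List Int → Option Bool
  | [] => some false
  | m :: ms =>
    match PySem.List.pyGet? dp m with
    | none => none
    | some v =>
      if t < v then some false
      else if dj + dk + v = t then some true
      else solMLoop t dj dk dp ms

-- 'for k in range(1,1001)' loop
def solKLoop (t dj : Int) (dp : List Int) : List Int → Option Bool
  | [] => some false
  | k :: ks =>
    match PySem.List.pyGet? dp k with
    | none => none
    | some v =>
      if t < v then some false
      else
        match solMLoop t dj v dp (PySem.List.pyRange 1 1001 1) with
        | none => none
        | some true => some true
        | some false => solKLoop t dj dp ks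

-- 'for j in range(1,1001)' loop
def solJLoop (t : Int) (dp : List Int) : List Int → Option Bool
  | [] => some false
  | j :: js =>
    match PySem.List.pyGet? dp j with
    | none => none
    | some v =>
      if t < v then some false
      else
        match solKLoop t v dp (PySem.List.pyRange 1 1001 1) with
        | none => none
        | some true => some true
        | some false => solJLoop t dp js

-- the IndexError outcome (none) is mapped to 0; Pre_solution excludes exactly those inputs
def solution (target : Int) (dp : List Int) : Int :=
  match solJLoop target dp (PySem.List.pyRange 1 1001 1) with
  | some true => 1
  | some false => 0
  | none => 0

-- ===== PORT B =====
-- Source B's first loop: walk the slice dp[1:1001], stop at the first value > target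
def solValsB (t : Int) : List Int → List Int
  | [] => []
  | v :: vs => if t < v then [] else v :: solValsB t vs

def solution_alt (target : Int) (dp : List Int) : Int :=
  let vals := solValsB target (PySem.List.slice dp (some 1) (some 1001))
  let s := PySem.Set.ofList vals
  if vals.any (fun x => vals.any (fun y => PySem.Set.contains s (target - x - y))) then 1 else 0

-- ===== PRECONDITION & SPEC =====
-- Pre_solution is exactly the set of inputs on which A returns (everywhere else A raises
-- IndexError): either the list reaches index 1000; or some scanned dp[i] exceeds target, so every
-- loop breaks before running off the end; or (short list, no such sentinel) the very first inner
-- scan finds dp[1]+dp[1]+dp[m] == target and A returns 1 before indexing past the end.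
def Pre_solution (target : Int) (dp : List Int) : Prop :=
  1001 ≤ dp.length ∨
  ((dp.take 1001).drop 1).any (fun v => decide (target < v)) = true ∨
  (2 ≤ dp.length ∧
    ((dp.take 1001).drop 1).any (fun v => decide (2 * dp.getD 1 0 + v = target)) = true)

instance (target : Int) (dp : List Int) : Decidable (Pre_solution target dp) := by
  unfold Pre_solution; infer_instance

def pvWitness_solution : Int × List Int := (0, [0, 1])

def Spec_solution (target : Int) (dp : List Int) (out : Int) : Prop := out = solution_alt target dp
instance (target : Int) (dp : List Int) (out : Int) : Decidable (Spec_solution target dp out) := by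
  unfold Spec_solution; infer_instance

-- ===== CLAIM (what is proved, stated in full; the proofs are below) =====
def Claim_equal_solution : Prop := ∀ (target : Int) (dp : List Int), Dom_solution target dp → Pre_solution target dp → Spec_solution target dp (solution target dp)

-- ===== LEMMAS AND PROOFS =====

-- A-side value prefix: the values A's scan of an index list visits (none-totalized: stops at
-- the first out-of-range index, like B does)
def solVals (t : Int) (dp : List Int) : List Int → List Int
  | [] => []
  | i :: is =>
    match PySem.List.pyGet? dp i with
    | none => []
    | some v => if t < v then [] else v :: solVals t dp is

-- 'no IndexError before break/end' for a scan of the given index list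
def solSafe (t : Int) (dp : List Int) : List Int → Prop
  | [] => True
  | i :: is =>
    match PySem.List.pyGet? dp i with
    | none => False
    | some v => if t < v then True else solSafe t dp is

-- m-loop = any over the collected value prefix, when the scan raises no IndexError
theorem solMLoop_char (t dj dk : Int) (dp : List Int) :
    ∀ is : List Int, solSafe t dp is →
      solMLoop t dj dk dp is =
        some ((solVals t dp is).any (fun v => decide (dj + dk + v = t)))
  | [], _ => by simp [solMLoop, solVals]
  | i :: is, h => by
    cases hg : PySem.List.pyGet? dp i with
    | none => simp only [solSafe, hg] at h
    | some v =>
      simp only [solSafe, hg] at h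
      simp only [solMLoop, solVals, hg]
      by_cases hv : t < v
      · simp [hv]
      · rw [if_neg hv] at h
        by_cases hs : dj + dk + v = t
        · simp [hv, hs]
        · simp [hv, hs, solMLoop_char t dj dk dp is h]

theorem solKLoop_char (t dj : Int) (dp : List Int)
    (hL : solSafe t dp (PySem.List.pyRange 1 1001 1)) :
    ∀ is : List Int, solSafe t dp is →
      solKLoop t dj dp is =
        some ((solVals t dp is).any (fun dk =>
          (solVals t dp (PySem.List.pyRange 1 1001 1)).any (fun dm =>
            decide (dj + dk + dm = t))))
  | [], _ => by simp [solKLoop, solVals]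
  | k :: ks, h => by
    cases hg : PySem.List.pyGet? dp k with
    | none => simp only [solSafe, hg] at h
    | some v =>
      simp only [solSafe, hg] at h
      simp only [solKLoop, solVals, hg]
      by_cases hv : t < v
      · simp [hv]
      · rw [if_neg hv] at h
        rw [solMLoop_char t dj v dp _ hL]
        cases hb : (solVals t dp (PySem.List.pyRange 1 1001 1)).any (fun dm =>
            decide (dj + v + dm = t)) with
        | true => simp [hv, hb]
        | false => simp [hv, hb, solKLoop_char t dj dp hL ks h]

theorem solJLoop_char (t : Int) (dp : List Int)
    (hL : solSafe t dp (PySem.List.pyRange 1 1001 1)) :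
    ∀ is : List Int, solSafe t dp is →
      solJLoop t dp is =
        some ((solVals t dp is).any (fun dj =>
          (solVals t dp (PySem.List.pyRange 1 1001 1)).any (fun dk =>
            (solVals t dp (PySem.List.pyRange 1 1001 1)).any (fun dm =>
              decide (dj + dk + dm = t)))))
  | [], _ => by simp [solJLoop, solVals]
  | j :: js, h => by
    cases hg : PySem.List.pyGet? dp j with
    | none => simp only [solSafe, hg] at h
    | some v =>
      simp only [solSafe, hg] at h
      simp only [solJLoop, solVals, hg]
      by_cases hv : t < v
      · simp [hv]
      · rw [if_neg hv] at h
        rw [solKLoop_char t v dp hL _ hL]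
        cases hb : (solVals t dp (PySem.List.pyRange 1 1001 1)).any (fun dk =>
            (solVals t dp (PySem.List.pyRange 1 1001 1)).any (fun dm =>
              decide (v + dk + dm = t))) with
        | true => simp [hv, hb]
        | false => simp [hv, hb, solJLoop_char t dp hL js h]

theorem solution_char (t : Int) (dp : List Int)
    (hL : solSafe t dp (PySem.List.pyRange 1 1001 1)) :
    solution t dp =
      if ((solVals t dp (PySem.List.pyRange 1 1001 1)).any (fun dj =>
          (solVals t dp (PySem.List.pyRange 1 1001 1)).any (fun dk =>
            (solVals t dp (PySem.List.pyRange 1 1001 1)).any (fun dm =>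
              decide (dj + dk + dm = t))))) = true
      then 1 else 0 := by
  unfold solution
  rw [solJLoop_char t dp hL _ hL]
  cases hb : (solVals t dp (PySem.List.pyRange 1 1001 1)).any (fun dj =>
      (solVals t dp (PySem.List.pyRange 1 1001 1)).any (fun dk =>
        (solVals t dp (PySem.List.pyRange 1 1001 1)).any (fun dm =>
          decide (dj + dk + dm = t)))) with
  | true => simp
  | false => simp

-- BRIDGE: A's index-scan prefix is B's slice-scan prefix, with no safety assumption
theorem solVals_eq_solValsB (t : Int) (dp : List Int) :
    ∀ (n : Nat) (a : Nat), 1001 - (a : Int) = (n : Int) →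
      solVals t dp (PySem.List.pyRange a 1001 1) = solValsB t ((dp.take 1001).drop a)
  | 0, a, hn => by
    rw [PySem.List.pyRange_one]
    have h0 : ((1001 : Int) - (a : Int)).toNat = 0 := by omega
    rw [h0]
    have : (dp.take 1001).drop a = [] := by
      apply List.drop_eq_nil_of_le
      simp only [List.length_take]
      omega
    simp [solVals, this, solValsB]
  | n + 1, a, hn => by
    rw [PySem.List.pyRange_one_cons (by omega : (a : Int) < 1001)]
    by_cases ha : a < dp.length
    · have hg : PySem.List.pyGet? dp (a : Int) = some dp[a] := by
        rw [PySem.List.pyGet?_natCast]; simp [ha]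
      have hdrop : (dp.take 1001).drop a = dp[a] :: (dp.take 1001).drop (a + 1) := by
        rw [List.drop_eq_getElem_cons (by simp; omega)]
        simp [List.getElem_take]
      simp only [solVals, hg, hdrop, solValsB]
      by_cases hv : t < dp[a]
      · simp [hv]
      · have hcast : ((a : Int) + 1) = ((a + 1 : Nat) : Int) := by push_cast; ring
        have hrec : solVals t dp (PySem.List.pyRange ((a : Int) + 1) 1001 1) =
            solValsB t ((dp.take 1001).drop (a + 1)) := by
          rw [hcast]; exact solVals_eq_solValsB t dp n (a + 1) (by push_cast; omega)
        simp only [if_neg hv]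
        exact congrArg (dp[a] :: ·) hrec
    · have hg : PySem.List.pyGet? dp (a : Int) = none := by
        rw [PySem.List.pyGet?_natCast]; simp; omega
      have : (dp.take 1001).drop a = [] := by
        apply List.drop_eq_nil_of_le
        simp only [List.length_take]
        omega
      simp [solVals, hg, this, solValsB]

-- safety when every scanned index is in range
theorem solSafe_of_all (t : Int) (dp : List Int) :
    ∀ is : List Int, (∀ i ∈ is, 0 ≤ i ∧ i < (dp.length : Int)) → solSafe t dp is
  | [], _ => trivial
  | i :: is, h => by
    obtain ⟨h0, h1⟩ := h i (by simp)
    have hg : PySem.List.pyGet? dp i = some dp[i.toNat] :=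
      PySem.List.pyGet?_eq_some_getElem dp h0 h1
    simp only [solSafe, hg]
    by_cases hv : t < dp[i.toNat]
    · simp [hv]
    · simpa [hv] using solSafe_of_all t dp is (fun j hj => h j (by simp [hj]))

theorem solSafe_long (t : Int) (dp : List Int) (h : 1001 ≤ dp.length) :
    solSafe t dp (PySem.List.pyRange 1 1001 1) :=
  solSafe_of_all t dp _ (fun i hi => by
    rw [PySem.List.mem_pyRange_one] at hi; constructor <;> omega)

-- safety when some scanned dp[s] exceeds target: every loop breaks no later than s
theorem solSafe_sentinel (t : Int) (dp : List Int) (s : Nat) (hs1 : 1 ≤ s)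
    (hs2 : s < min dp.length 1001) (hst : t < dp.getD s 0) :
    ∀ (n : Nat) (a : Int), 1001 - a = (n : Int) → 1 ≤ a → a ≤ (s : Int) →
      solSafe t dp (PySem.List.pyRange a 1001 1)
  | 0, a, hn, ha, has => by exfalso; omega
  | n + 1, a, hn, ha, has => by
    rw [PySem.List.pyRange_one_cons (by omega : a < 1001)]
    have hA : a < (dp.length : Int) := by omega
    have hg : PySem.List.pyGet? dp a = some dp[a.toNat] :=
      PySem.List.pyGet?_eq_some_getElem dp (by omega) hA
    simp only [solSafe, hg]
    by_cases hv : t < dp[a.toNat]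
    · simp [hv]
    · have hne : a ≠ (s : Int) := by
        intro he
        rw [← List.getD_eq_getElem dp 0 (by omega : a.toNat < dp.length)] at hv
        have hts : a.toNat = s := by omega
        rw [hts] at hv
        exact hv hst
      simpa [hv] using solSafe_sentinel t dp s hs1 hs2 hst n (a + 1) (by omega)
        (by omega) (by omega)

-- the two any-conditions of solution_char and solution_alt agree
theorem any_triple_eq_any_contains (t : Int) (V : List Int) :
    (V.any (fun dj => V.any (fun dk => V.any (fun dm => decide (dj + dk + dm = t))))) =
      (V.any (fun x => V.any (fun y =>
        PySem.Set.contains (PySem.Set.ofList V) (t - x - y)))) := by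
  refine PySem.List.any_congr_mem (fun x hx => ?_)
  refine PySem.List.any_congr_mem (fun y hy => ?_)
  rw [Bool.eq_iff_iff]
  constructor
  · intro h
    obtain ⟨z, hz, he⟩ := List.any_eq_true.mp h
    have : t - x - y = z := by
      have := of_decide_eq_true he; omega
    simp [pysem, this, hz]
  · intro h
    have hmem : t - x - y ∈ V := by simpa [pysem] using h
    exact List.any_eq_true.mpr ⟨t - x - y, hmem, by simp only [decide_eq_true_eq]; omega⟩

-- with no value above t the collecting scan keeps the whole list
theorem solValsB_all (t : Int) : ∀ l : List Int, (∀ v ∈ l, ¬ t < v) → solValsB t l = l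
  | [], _ => rfl
  | v :: vs, h => by
    have hv : ¬ t < v := h v (by simp)
    simp only [solValsB, if_neg hv]
    rw [solValsB_all t vs (fun w hw => h w (by simp [hw]))]

-- the same, with the numeral start index 1
theorem solVals_one_eq (t : Int) (dp : List Int) :
    solVals t dp (PySem.List.pyRange 1 1001 1) = solValsB t ((dp.take 1001).drop 1) := by
  have h := solVals_eq_solValsB t dp 1000 1 (by norm_num)
  simpa using h

-- B's result phrased over the A-side prefix
theorem solution_alt_char (t : Int) (dp : List Int) :
    solution_alt t dp =
      if ((solVals t dp (PySem.List.pyRange 1 1001 1)).any (fun dj =>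
          (solVals t dp (PySem.List.pyRange 1 1001 1)).any (fun dk =>
            (solVals t dp (PySem.List.pyRange 1 1001 1)).any (fun dm =>
              decide (dj + dk + dm = t))))) = true
      then 1 else 0 := by
  unfold solution_alt
  have hsl : PySem.List.slice dp (some 1) (some 1001) = (dp.take 1001).drop 1 := by
    rw [show ((1 : Int)) = ((1 : Nat) : Int) by norm_num,
        show ((1001 : Int)) = ((1001 : Nat) : Int) by norm_num,
        PySem.List.slice_natCast]
    simp [List.drop_take]
  rw [hsl, ← solVals_one_eq t dp,
      any_triple_eq_any_contains t (solVals t dp (PySem.List.pyRange 1 1001 1))]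

-- equality whenever the scan of the full range is safe
theorem sol_eq_of_safe (t : Int) (dp : List Int)
    (hL : solSafe t dp (PySem.List.pyRange 1 1001 1)) :
    solution t dp = solution_alt t dp := by
  rw [solution_char t dp hL, solution_alt_char t dp]

-- early-return lemma: the m-loop hits a witness index before any break or IndexError
theorem solMLoop_true (t dj dk : Int) (dp : List Int) (m : Nat) (hm1 : 1 ≤ m)
    (hmlen : m < dp.length) (hm1001 : m < 1001)
    (hsum : dj + dk + dp.getD m 0 = t)
    (hall : ∀ i : Nat, 1 ≤ i → i ≤ m → ¬ t < dp.getD i 0) :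
    ∀ (n : Nat) (a : Nat), 1001 - (a : Int) = (n : Int) → 1 ≤ a → a ≤ m →
      solMLoop t dj dk dp (PySem.List.pyRange a 1001 1) = some true
  | 0, a, hn, ha, ham => by exfalso; omega
  | n + 1, a, hn, ha, ham => by
    rw [PySem.List.pyRange_one_cons (by omega : (a : Int) < 1001)]
    have halen : a < dp.length := by omega
    have hg : PySem.List.pyGet? dp (a : Int) = some dp[a] := by
      rw [PySem.List.pyGet?_natCast]; simp [halen]
    have hget : dp[a] = dp.getD a 0 := by
      rw [List.getD_eq_getElem dp 0 halen]
    simp only [solMLoop, hg]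
    have hv : ¬ t < dp[a] := by rw [hget]; exact hall a ha ham
    rw [if_neg hv]
    by_cases hs : dj + dk + dp[a] = t
    · simp [hs]
    · have hne : a ≠ m := by
        intro he; apply hs; rw [hget, he]; exact hsum
      rw [if_neg hs]
      have hcast : ((a : Int) + 1) = ((a + 1 : Nat) : Int) := by push_cast; ring
      rw [hcast]
      exact solMLoop_true t dj dk dp m hm1 hmlen hm1001 hsum hall n (a + 1)
        (by push_cast; push_cast at hn; omega) (by omega) (by omega)

theorem solution_spec : Claim_equal_solution := by
  intro t dp _ hpre
  unfold Spec_solution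
  by_cases hsafe : 1001 ≤ dp.length ∨
      ((dp.take 1001).drop 1).any (fun v => decide (t < v)) = true
  · rcases hsafe with hlong | hsent
    · exact sol_eq_of_safe t dp (solSafe_long t dp hlong)
    · obtain ⟨v, hv, hvt⟩ := List.any_eq_true.mp hsent
      rw [List.mem_iff_getElem] at hv
      obtain ⟨k, hk, hkv⟩ := hv
      have hklen : 1 + k < min dp.length 1001 := by
        simp only [List.length_drop, List.length_take] at hk; omega
      rw [List.getElem_drop, List.getElem_take] at hkv
      have hst : t < dp.getD (1 + k) 0 := by
        rw [List.getD_eq_getElem dp 0 (by omega : 1 + k < dp.length), hkv]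
        exact of_decide_eq_true hvt
      exact sol_eq_of_safe t dp
        (solSafe_sentinel t dp (1 + k) (by omega) hklen hst 1000 1 (by norm_num)
          le_rfl (by omega))
  · -- no full safe scan: Pre_ puts us in its third disjunct, A returns 1 early and so does B
    rw [not_or] at hsafe
    obtain ⟨hshort, hnosent⟩ := hsafe
    rcases hpre with h1 | h2 | ⟨hlen2, hwit⟩
    · exact absurd h1 hshort
    · exact absurd h2 hnosent
    -- extract the witness value and its index
    obtain ⟨v, hv, hvt⟩ := List.any_eq_true.mp hwit
    rw [List.mem_iff_getElem] at hv
    obtain ⟨k, hk, hkv⟩ := hv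
    have hklen : 1 + k < min dp.length 1001 := by
      simp only [List.length_drop, List.length_take] at hk; omega
    rw [List.getElem_drop, List.getElem_take] at hkv
    have hsum : dp.getD 1 0 + dp.getD 1 0 + dp.getD (1 + k) 0 = t := by
      rw [List.getD_eq_getElem dp 0 (by omega : 1 + k < dp.length), hkv]
      have := of_decide_eq_true hvt; omega
    have hall : ∀ i : Nat, 1 ≤ i → i ≤ 1 + k → ¬ t < dp.getD i 0 := by
      intro i hi1 hik ht
      apply hnosent
      refine List.any_eq_true.mpr ⟨dp.getD i 0, ?_, by simpa using ht⟩
      have hilen : i < dp.length := by omega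
      rw [List.getD_eq_getElem dp 0 hilen, List.mem_iff_getElem]
      refine ⟨i - 1, by simp only [List.length_drop, List.length_take]; omega, ?_⟩
      rw [List.getElem_drop, List.getElem_take]
      congr 1
      omega
    have h1len : 1 < dp.length := by omega
    have hg1 : PySem.List.pyGet? dp 1 = some (dp.getD 1 0) := by
      rw [show ((1 : Int)) = ((1 : Nat) : Int) by norm_num, PySem.List.pyGet?_natCast,
          List.getElem?_eq_getElem h1len, List.getD_eq_getElem dp 0 h1len]
    have hv1 : ¬ t < dp.getD 1 0 := hall 1 le_rfl (by omega)
    have hmT : solMLoop t (dp.getD 1 0) (dp.getD 1 0) dp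
        (PySem.List.pyRange 1 1001 1) = some true := by
      have h := solMLoop_true t (dp.getD 1 0) (dp.getD 1 0) dp (1 + k) (by omega)
        (by omega) (by omega) hsum hall 1000 1 (by norm_num) le_rfl (by omega)
      simpa using h
    have hk1 : solKLoop t (dp.getD 1 0) dp (PySem.List.pyRange 1 1001 1) = some true := by
      rw [PySem.List.pyRange_one_cons (by norm_num : (1 : Int) < 1001)]
      simp only [solKLoop, hg1]
      rw [if_neg hv1, hmT]
    have hj1 : solJLoop t dp (PySem.List.pyRange 1 1001 1) = some true := by
      rw [PySem.List.pyRange_one_cons (by norm_num : (1 : Int) < 1001)]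
      simp only [solJLoop, hg1]
      rw [if_neg hv1, hk1]
    have hA : solution t dp = 1 := by
      unfold solution
      rw [hj1]
    -- B also returns 1: with no sentinel the whole slice is collected and the triple is in it
    have hVfull : solValsB t ((dp.take 1001).drop 1) = (dp.take 1001).drop 1 := by
      have hle : ∀ v ∈ (dp.take 1001).drop 1, ¬ t < v := by
        intro v hv ht
        exact hnosent (List.any_eq_true.mpr ⟨v, hv, by simpa using ht⟩)
      exact solValsB_all t _ hle
    have hm1 : dp.getD 1 0 ∈ (dp.take 1001).drop 1 := by
      rw [List.getD_eq_getElem dp 0 h1len, List.mem_iff_getElem]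
      refine ⟨0, by simp only [List.length_drop, List.length_take]; omega, ?_⟩
      rw [List.getElem_drop, List.getElem_take]
    have hm2 : dp.getD (1 + k) 0 ∈ (dp.take 1001).drop 1 := by
      rw [List.getD_eq_getElem dp 0 (by omega : 1 + k < dp.length), List.mem_iff_getElem]
      refine ⟨k, by simp only [List.length_drop, List.length_take]; omega, ?_⟩
      rw [List.getElem_drop, List.getElem_take]
    have hB : solution_alt t dp = 1 := by
      rw [solution_alt_char t dp, solVals_one_eq t dp, hVfull, if_pos]
      exact List.any_eq_true.mpr ⟨dp.getD 1 0, hm1,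
        List.any_eq_true.mpr ⟨dp.getD 1 0, hm1,
          List.any_eq_true.mpr ⟨dp.getD (1 + k) 0, hm2, by
            simp only [decide_eq_true_eq]; omega⟩⟩⟩
    rw [hA, hB]
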